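-- pv_equiv track=rewrite | github.com/rspber/TSD_Fonts | a2tsd/tsdfont.py | font0_font1
-- ===== SOURCE A (Python) =====
-- def font0_font1(w, h, bp0):
-- 	bp1 = []
-- 	i = 0
-- 	b = 0
-- 	c = 0
-- 	bits = 0;
-- 	k = 0
-- 	n = ((w + 7) >> 3) * h
-- 	while len(bp1) < n:
-- 		if b == 0:
-- 			bits = bp0[k]
-- 			k = k + 1
-- 			b = 0x80
-- 		if i > 0 and (i & 0x07) == 0:
-- 			bp1.append(c)
-- 			c = 0
-- 		c = (c << 1) | int(bits & b > 0)
-- 		b = b >> 1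
-- 		i = i + 1
-- 		if i >= w:
-- 			if i & 7:
-- 				c <<= 8 - (i & 7)
-- 			bp1.append(c)
-- 			c = 0
-- 			i = 0
-- 	return bp1
-- ===== SOURCE B (Python) =====
-- def font0_font1(w, h, bp0):
--     # Per-output-byte closed form: each packed output byte is cut directly out of
--     # (at most) two adjacent source bytes with shifts and masks -- no bit-by-bit
--     # streaming, no accumulator, no running mask.
--     if w <= 0 or h <= 0:
--         return []
--     bpr = (w + 7) >> 3          # output bytes per row
--     out = []
--     for r in range(h):
--         base = r * w            # global bit position where this row starts
--         for jb in range(bpr):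
--             s = base + 8 * jb               # first source bit of this output byte
--             e = min(s + 8, base + w)        # one past its last source bit
--             nbits = e - s
--             lo = s >> 3
--             off = s & 7
--             chunk = (bp0[lo] & 0xFF) << 8
--             if (e - 1) >> 3 > lo:
--                 chunk |= bp0[lo + 1] & 0xFF
--             out.append(((chunk >> (16 - off - nbits)) & ((1 << nbits) - 1)) << (8 - nbits))
--     return out
-- ===== Notes on version B (the rewrite author's own statement) =====
-- stated objective: alternative
-- what changed: Replaces A's bit-by-bit streaming loop (moving mask b, lazily fetched byte, per-bit accumulator) by a per-output-byte closed form: for each of the (w+7)>>3 * h output bytes it cuts the byte directly out of at most two adjacent source bytes with shifts and masks, so no per-bit work, accumulator or running mask exists at all.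
-- intended difference: On w <= -8 and h <= -1 (both dimensions negative) A's byte count ((w+7)>>3)*h is accidentally positive, so A returns a nonempty list of junk one-bit 'rows'; B returns [], the intended result for non-positive dimensions. — e.g. on font0_font1(-8, -1, [0]): A returns [0], B returns []
import Mathlib
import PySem

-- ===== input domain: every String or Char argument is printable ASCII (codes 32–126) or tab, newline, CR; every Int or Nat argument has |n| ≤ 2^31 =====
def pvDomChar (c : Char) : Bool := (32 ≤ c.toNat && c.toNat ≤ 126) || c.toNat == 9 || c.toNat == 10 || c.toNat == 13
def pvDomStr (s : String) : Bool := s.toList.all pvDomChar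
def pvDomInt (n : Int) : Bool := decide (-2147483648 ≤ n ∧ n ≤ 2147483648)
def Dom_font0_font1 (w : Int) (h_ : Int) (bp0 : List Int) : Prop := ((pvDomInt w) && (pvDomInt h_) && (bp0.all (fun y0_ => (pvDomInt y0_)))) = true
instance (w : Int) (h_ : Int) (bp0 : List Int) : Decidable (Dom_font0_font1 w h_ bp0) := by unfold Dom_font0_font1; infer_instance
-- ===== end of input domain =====

-- B computes each packed output byte in closed form from at most two adjacent source bytes
-- (shifts and masks, no per-bit work); A streams bit by bit with a moving mask and a
-- per-bit accumulator.  Objective: alternative algorithm.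

-- ===== PORT A =====
-- rest of one iteration of A's while-loop after the lazy byte fetch:
-- returns the next state (bp1, i, b, c, bits, k)
def fontA_step (w : Int) (bp1 : List Int) (i b c bits k : Int) :
    List Int × Int × Int × Int × Int × Int :=
  let p := if 0 < i ∧ PySem.Int.band i 7 = 0 then (bp1 ++ [c], (0 : Int)) else (bp1, c)
  let c1 := PySem.Int.bor (p.2 <<< (1 : Nat)) (if 0 < PySem.Int.band bits b then 1 else 0)
  let b1 := b >>> (1 : Nat)
  let i1 := i + 1
  if w ≤ i1 then
    let c2 := if PySem.Int.band i1 7 ≠ 0 then c1 <<< (8 - PySem.Int.band i1 7).toNat else c1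
    (p.1 ++ [c2], 0, b1, 0, bits, k)
  else (p.1, i1, b1, c1, bits, k)

-- A's while-loop (one fuel tick per iteration; fuel 8*n covers every terminating run)
def fontA_loop (w n : Int) (bp0 : List Int) :
    Nat → List Int → Int → Int → Int → Int → Int → List Int
  | 0, bp1, _, _, _, _, _ => bp1
  | fuel + 1, bp1, i, b, c, bits, k =>
    if (bp1.length : Int) < n then
      match (if b = 0 then (PySem.List.pyGet? bp0 k).map (fun v => (v, k + 1, (128 : Int)))
             else some (bits, k, b)) with
      | none => bp1   -- Python raises IndexError here (outside Pre_)
      | some (bits1, k1, b1) =>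
        let s := fontA_step w bp1 i b1 c bits1 k1
        fontA_loop w n bp0 fuel s.1 s.2.1 s.2.2.1 s.2.2.2.1 s.2.2.2.2.1 s.2.2.2.2.2
    else bp1

def font0_font1 (w : Int) (h_ : Int) (bp0 : List Int) : List Int :=
  let n := ((w + 7) >>> (3 : Nat)) * h_
  fontA_loop w n bp0 (8 * n).toNat [] 0 0 0 0 0

-- ===== PORT B =====
-- B: one output byte, cut in closed form out of (at most) two adjacent source bytes
def fontC_byte (bp0 : List Int) (s e : Int) : Option Int :=
  match PySem.List.pyGet? bp0 (s >>> (3 : Nat)) with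
  | none => none   -- Python raises IndexError here (outside Pre_)
  | some x =>
    let nbits := e - s
    let off := PySem.Int.band s 7
    let chunk0 := (PySem.Int.band x 255) <<< (8 : Nat)
    if s >>> (3 : Nat) < (e - 1) >>> (3 : Nat) then
      match PySem.List.pyGet? bp0 (s >>> (3 : Nat) + 1) with
      | none => none   -- Python raises IndexError here (outside Pre_)
      | some y =>
        some ((PySem.Int.band ((PySem.Int.bor chunk0 (PySem.Int.band y 255)) >>> (16 - off - nbits).toNat)
          (((1 : Int) <<< nbits.toNat) - 1)) <<< ((8 - nbits).toNat))
    else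
      some ((PySem.Int.band (chunk0 >>> (16 - off - nbits).toNat)
        (((1 : Int) <<< nbits.toNat) - 1)) <<< ((8 - nbits).toNat))

-- B: inner loop over the bpr output bytes of one row (jb = current byte index)
def fontC_cols (bp0 : List Int) (base w : Int) : Nat → Int → List Int → Option (List Int)
  | 0, _, out => some out
  | m + 1, jb, out =>
    let s := base + 8 * jb
    let e := min (s + 8) (base + w)
    match fontC_byte bp0 s e with
    | none => none
    | some v => fontC_cols bp0 base w m (jb + 1) (out ++ [v])

-- B: outer loop over the h rows (r = current row index)
def fontC_rows (bp0 : List Int) (w : Int) (bpr : Nat) : Nat → Int → List Int → List Int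
  | 0, _, out => out
  | k + 1, r, out =>
    match fontC_cols bp0 (r * w) w bpr 0 out with
    | none => out   -- Python raises IndexError here (outside Pre_)
    | some out1 => fontC_rows bp0 w bpr k (r + 1) out1

def font0_font1_alt (w : Int) (h_ : Int) (bp0 : List Int) : List Int :=
  if w ≤ 0 ∨ h_ ≤ 0 then [] else fontC_rows bp0 w (((w + 7) >>> (3 : Nat)).toNat) h_.toNat 0 []

-- ===== PRECONDITION & SPEC =====
-- Pre_ excludes exactly the inputs on which A raises IndexError: bp0 shorter than
-- the number of source bytes A's loop fetches.
def Pre_font0_font1 (w : Int) (h_ : Int) (bp0 : List Int) : Prop :=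
  (0 < w → 0 < h_ → w * h_ ≤ 8 * (bp0.length : Int)) ∧
  (w ≤ -8 → h_ ≤ -1 → ((w + 7) >>> (3 : Nat)) * h_ ≤ 8 * (bp0.length : Int))
instance (w : Int) (h_ : Int) (bp0 : List Int) : Decidable (Pre_font0_font1 w h_ bp0) := by
  unfold Pre_font0_font1; infer_instance

def pvWitness_font0_font1 : Int × Int × List Int := (3, 2, [255, 129])

-- On w ≤ -8 and h_ ≤ -1 A's byte count ((w+7)>>3)*h is accidentally positive, so A returns a
-- nonempty list of junk one-bit "rows"; B returns [] there, the intended result for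
-- non-positive dimensions.
def D_font0_font1 (w : Int) (h_ : Int) (bp0 : List Int) : Prop := w ≤ -8 ∧ h_ ≤ -1
instance (w : Int) (h_ : Int) (bp0 : List Int) : Decidable (D_font0_font1 w h_ bp0) := by
  unfold D_font0_font1; infer_instance

def Spec_font0_font1 (w : Int) (h_ : Int) (bp0 : List Int) (out : List Int) : Prop :=
  ¬ D_font0_font1 w h_ bp0 → out = font0_font1_alt w h_ bp0
instance (w : Int) (h_ : Int) (bp0 : List Int) (out : List Int) : Decidable (Spec_font0_font1 w h_ bp0 out) := by
  unfold Spec_font0_font1; infer_instance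

def pvDiffWitness_font0_font1 : Int × Int × List Int := (-8, -1, [0])
def pvDiffWitnessOut_font0_font1 : (List Int) × (List Int) := ([0], [])

-- ===== CLAIM (what is proved, stated in full; the proofs are below) =====
def Claim_unchanged_font0_font1 : Prop := ∀ (w : Int) (h_ : Int) (bp0 : List Int), Dom_font0_font1 w h_ bp0 → Pre_font0_font1 w h_ bp0 → Spec_font0_font1 w h_ bp0 (font0_font1 w h_ bp0)
def Claim_changed_font0_font1 : Prop := Dom_font0_font1 (pvDiffWitness_font0_font1.1) (pvDiffWitness_font0_font1.2.1) (pvDiffWitness_font0_font1.2.2) ∧ Pre_font0_font1 (pvDiffWitness_font0_font1.1) (pvDiffWitness_font0_font1.2.1) (pvDiffWitness_font0_font1.2.2) ∧ D_font0_font1 (pvDiffWitness_font0_font1.1) (pvDiffWitness_font0_font1.2.1) (pvDiffWitness_font0_font1.2.2) ∧ font0_font1 (pvDiffWitness_font0_font1.1) (pvDiffWitness_font0_font1.2.1) (pvDiffWitness_font0_font1.2.2) = pvDiffWitnessOut_font0_font1.1 ∧ font0_font1_alt (pvDiffWitness_font0_font1.1) (pvDiffWitness_font0_font1.2.1) (pvDiffWitness_font0_font1.2.2)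 = pvDiffWitnessOut_font0_font1.2 ∧ pvDiffWitnessOut_font0_font1.1 ≠ pvDiffWitnessOut_font0_font1.2
def Claim_exact_font0_font1 : Prop := ∀ (w : Int) (h_ : Int) (bp0 : List Int), Dom_font0_font1 w h_ bp0 → Pre_font0_font1 w h_ bp0 → D_font0_font1 w h_ bp0 → font0_font1 w h_ bp0 ≠ font0_font1_alt w h_ bp0

-- ===== LEMMAS AND PROOFS =====

-- A's bit-streaming loop is first related to an intermediate bit-at-a-time row packer
-- (fontB_row / fontB_rows below), then that packer is related to B's closed-form bytes.

-- proof-side middle form: inner loop over the w bits of one row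
def fontB_row (bp0 : List Int) :
    Nat → Int → Int → Int → List Int → Option (List Int × Int)
  | 0, pos, acc, cnt, out =>
    some ((if cnt ≠ 0 then out ++ [acc <<< (8 - cnt).toNat] else out), pos)
  | m + 1, pos, acc, cnt, out =>
    match PySem.List.pyGet? bp0 (pos >>> (3 : Nat)) with
    | none => none
    | some byte =>
      let bit := PySem.Int.band (byte >>> (7 - PySem.Int.band pos 7).toNat) 1
      let acc1 := PySem.Int.bor (acc <<< (1 : Nat)) bit
      if cnt + 1 = 8 then fontB_row bp0 m (pos + 1) 0 0 (out ++ [acc1])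
      else fontB_row bp0 m (pos + 1) acc1 (cnt + 1) out

-- proof-side middle form: outer loop over the h rows
def fontB_rows (bp0 : List Int) (wn : Nat) :
    Nat → Int → List Int → List Int
  | 0, _, out => out
  | r + 1, pos, out =>
    match fontB_row bp0 wn pos 0 0 out with
    | none => out
    | some (out1, pos1) => fontB_rows bp0 wn r pos1 out1

-- the A-loop state (b, bits, k) as a function of the global bit position pos
def pvBK (bp0 : List Int) (pos b bits k : Int) : Prop :=
  (pos % 8 = 0 ∧ b = 0 ∧ k = pos / 8) ∨
  (pos % 8 ≠ 0 ∧ b = (128 : Int) >>> (pos % 8).toNat ∧ k = pos / 8 + 1 ∧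
    PySem.List.pyGet? bp0 (pos / 8) = some bits)

lemma pv_get_of_range {xs : List Int} {idx : Int} (h0 : 0 ≤ idx) (h1 : idx < xs.length) :
    ∃ v, PySem.List.pyGet? xs idx = some v := by
  have ht : idx.toNat < xs.length := by omega
  exact ⟨xs[idx.toNat], by
    simp [PySem.List.pyGet?, PySem.List.pyIdx?, h0, h1, List.getElem?_eq_getElem ht]⟩

lemma pv_band7 (i : Int) (h : 0 ≤ i) : PySem.Int.band i 7 = i % 8 := by
  obtain ⟨m, rfl⟩ := Int.eq_ofNat_of_zero_le h
  rw [show (7 : Int) = ((7 : Nat) : Int) from rfl, PySem.Int.band_natCast,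
    show (7 : Nat) = 2 ^ 3 - 1 from rfl, Nat.and_two_pow_sub_one_eq_mod]
  push_cast
  norm_num

-- A's test `bits & b > 0` (with b = 2^t) reads the same bit as `(bits >> t) & 1`
lemma pv_bit (x : Int) (t : Nat) :
    (if 0 < PySem.Int.band x ((2 : Int) ^ t) then (1 : Int) else 0)
      = PySem.Int.band (x >>> t) 1 := by
  rw [PySem.Int.band_one, PySem.Int.mod_eq_emod_of_pos (by norm_num), Int.shiftRight_eq_div_pow]
  have h2 : ((2 : Int) ^ t) = ((2 ^ t : Nat) : Int) := by push_cast; ring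
  have h2p : (0 : Int) < ((2 ^ t : Nat) : Int) := by positivity
  by_cases hx : 0 ≤ x
  · obtain ⟨m, rfl⟩ := Int.eq_ofNat_of_zero_le hx
    rw [h2, PySem.Int.band_natCast, Nat.and_two_pow, Nat.testBit_eq_decide_div_mod_eq]
    have hcast : ((m : Int)) / ((2 ^ t : Nat) : Int) % 2 = ((m / 2 ^ t % 2 : Nat) : Int) := by
      push_cast; ring
    rcases Nat.mod_two_eq_zero_or_one (m / 2 ^ t) with hm | hm <;> rw [hcast, hm] <;> norm_num
  · have hmn : 0 ≤ -x - 1 := by omega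
    obtain ⟨m, hm⟩ : ∃ m : Nat, (m : Int) = -x - 1 := ⟨(-x - 1).toNat, by omega⟩
    have hxm : x = -(m : Int) - 1 := by omega
    have hb : PySem.Int.band x (((2 ^ t : Nat) : Int)) = ((2 ^ t - (m &&& 2 ^ t) : Nat) : Int) := by
      simp only [PySem.Int.band]
      rw [if_neg (by omega), if_pos (by positivity)]
      rw [Int.toNat_natCast, show (-x - 1).toNat = m by omega, Nat.and_comm]
    have hdm : ((2 ^ t : Nat) : Int) * ((m / 2 ^ t : Nat) : Int) + ((m % 2 ^ t : Nat) : Int)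
        = (m : Int) := by exact_mod_cast congrArg (Nat.cast : Nat → Int) (Nat.div_add_mod m (2 ^ t))
    have hmlt : m % 2 ^ t < 2 ^ t := Nat.mod_lt _ (by positivity)
    have hq : x / ((2 ^ t : Nat) : Int) = -((m / 2 ^ t : Nat) : Int) - 1 := by
      refine ((Int.ediv_emod_unique (a := x) (b := ((2 ^ t : Nat) : Int))
        (r := ((2 ^ t : Nat) : Int) - ((m % 2 ^ t : Nat) : Int) - 1)
        (q := -((m / 2 ^ t : Nat) : Int) - 1) h2p).mpr ⟨?_, ?_, ?_⟩).1
      · rw [hxm]; linear_combination -hdm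
      · push_cast; omega
      · push_cast; omega
    have hrhs : (-((m / 2 ^ t : Nat) : Int) - 1) % 2 = 1 - ((m / 2 ^ t % 2 : Nat) : Int) := by
      push_cast; omega
    rw [h2, hb, hq, Nat.and_two_pow, Nat.testBit_eq_decide_div_mod_eq, hrhs]
    rcases Nat.mod_two_eq_zero_or_one (m / 2 ^ t) with hm2 | hm2 <;> rw [hm2] <;> norm_num

lemma pv_mask_pow (j : Nat) (hj : j < 8) : (128 : Int) >>> j = 2 ^ (7 - j) := by
  interval_cases j <;> decide

lemma pv_shr3 (pos : Int) : pos >>> (3 : Nat) = pos / 8 := by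
  rw [Int.shiftRight_eq_div_pow]; norm_num

lemma pv_bq (w : Int) : (w + 7) >>> (3 : Nat) = (w + 7) / 8 := by
  rw [Int.shiftRight_eq_div_pow]; norm_num

lemma pv_fontB_row_total (bp0 : List Int) :
    ∀ (m : Nat) (pos acc cnt : Int) (out : List Int),
      0 ≤ pos → pos + m ≤ 8 * (bp0.length : Int) →
      ∃ out1, fontB_row bp0 m pos acc cnt out = some (out1, pos + m) := by
  intro m
  induction m with
  | zero =>
    intro pos acc cnt out _ _
    exact ⟨if cnt ≠ 0 then out ++ [acc <<< (8 - cnt).toNat] else out, by simp [fontB_row]⟩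
  | succ m IH =>
    intro pos acc cnt out h0 h1
    have hidx0 : 0 ≤ pos / 8 := by omega
    have hidxlt : pos / 8 < (bp0.length : Int) := by omega
    obtain ⟨v, hv⟩ := pv_get_of_range hidx0 hidxlt
    obtain ⟨o1, h1'⟩ := IH (pos + 1) 0 0 (out ++ [PySem.Int.bor (acc <<< (1 : Nat))
      (PySem.Int.band (v >>> (7 - PySem.Int.band pos 7).toNat) 1)]) (by omega)
      (by push_cast at h1 ⊢; omega)
    obtain ⟨o2, h2'⟩ := IH (pos + 1) (PySem.Int.bor (acc <<< (1 : Nat))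
      (PySem.Int.band (v >>> (7 - PySem.Int.band pos 7).toNat) 1)) (cnt + 1) out
      (by omega) (by push_cast at h1 ⊢; omega)
    simp only [fontB_row, pv_shr3, hv]
    by_cases hc : cnt + 1 = 8
    · rw [if_pos hc]
      exact ⟨o1, by rw [h1']; congr 1; push_cast; ring_nf⟩
    · rw [if_neg hc]
      exact ⟨o2, by rw [h2']; congr 1; push_cast; ring_nf⟩

lemma fontA_loop_len_mono (w n : Int) (bp0 : List Int) :
    ∀ (fuel : Nat) (bp1 : List Int) (i b c bits k : Int),
      bp1.length ≤ (fontA_loop w n bp0 fuel bp1 i b c bits k).length := by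
  intro fuel
  induction fuel with
  | zero => intro bp1 i b c bits k; simp [fontA_loop]
  | succ f IH =>
    intro bp1 i b c bits k
    simp only [fontA_loop]
    split
    · rename_i hlt
      cases hfetch : (if b = 0 then (PySem.List.pyGet? bp0 k).map (fun v => (v, k + 1, (128 : Int)))
          else some (bits, k, b)) with
      | none => exact le_refl _
      | some s3 =>
        obtain ⟨bits1, k1, b1⟩ := s3
        have hstep : bp1.length ≤ (fontA_step w bp1 i b1 c bits1 k1).1.length := by
          simp only [fontA_step]
          split_ifs <;> simp
        exact le_trans hstep (IH _ _ _ _ _ _)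
    · exact le_refl _

lemma pv_bk_step (bp0 : List Int) (pos bits1 : Int) (hpn : 0 ≤ pos)
    (hget : PySem.List.pyGet? bp0 (pos / 8) = some bits1) :
    pvBK bp0 (pos + 1) (((128 : Int) >>> (pos % 8).toNat) >>> (1 : Nat)) bits1 (pos / 8 + 1) := by
  obtain ⟨j, hj, hpj⟩ : ∃ j : Nat, j < 8 ∧ pos % 8 = (j : Int) := ⟨(pos % 8).toNat, by omega, by omega⟩
  rw [show (pos % 8).toNat = j by omega]
  by_cases h7 : j = 7
  · left
    subst h7
    exact ⟨by omega, by decide, by omega⟩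
  · right
    refine ⟨by omega, ?_, by omega, ?_⟩
    · rw [show ((pos + 1) % 8).toNat = j + 1 by omega]
      interval_cases j <;> simp_all <;> decide
    · rw [show (pos + 1) / 8 = pos / 8 by omega]
      exact hget

lemma pv_inner (w h_ : Int) (bp0 : List Int) (hw : 0 < w) (hh : 0 < h_)
    (hlen : h_ * w ≤ 8 * (bp0.length : Int)) (r : Nat) (hr : (r : Int) < h_)
    (Hcont : ∀ (pos b bits k : Int) (out : List Int) (fuel : Nat),
        pos = (h_ - r) * w → (out.length : Int) = (h_ - r) * ((w + 7) >>> (3 : Nat)) →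
        pvBK bp0 pos b bits k → r * w.toNat ≤ fuel →
        fontA_loop w (((w + 7) >>> (3 : Nat)) * h_) bp0 fuel out 0 b 0 bits k
          = fontB_rows bp0 w.toNat r pos out) :
    ∀ (m : Nat) (i pos b bits k acc cnt c : Int) (out bp1 : List Int) (fuel : Nat),
      0 < m → (m : Int) ≤ w → i = w - m →
      pos = (h_ - 1 - r) * w + i →
      pvBK bp0 pos b bits k →
      cnt = i % 8 →
      ((0 < i ∧ i % 8 = 0 ∧ acc = 0 ∧ out = bp1 ++ [c]) ∨
        (acc = c ∧ out = bp1 ∧ (0 < i → i % 8 ≠ 0))) →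
      (out.length : Int) = (h_ - 1 - r) * ((w + 7) >>> (3 : Nat)) + i / 8 →
      m + r * w.toNat ≤ fuel →
      ∀ out1 pos1, fontB_row bp0 m pos acc cnt out = some (out1, pos1) →
      fontA_loop w (((w + 7) >>> (3 : Nat)) * h_) bp0 fuel bp1 i b c bits k
        = fontB_rows bp0 w.toNat r pos1 out1 := by
  intro m
  induction m with
  | zero =>
    intro i pos b bits k acc cnt c out bp1 fuel h0
    exact absurd h0 (lt_irrefl 0)
  | succ m IH =>
    intro i pos b bits k acc cnt c out bp1 fuel _ hmw hi hpos hbk hcnt hstate hout hfuel out1 pos1 hB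
    push_cast at hmw hi
    have hbq : (w + 7) >>> (3 : Nat) = (w + 7) / 8 := pv_bq w
    have hiw : i < w := by omega
    have hin : 0 ≤ i := by omega
    have hh1r : 0 ≤ h_ - 1 - (r : Int) := by
      have : (r : Int) < h_ := hr
      omega
    have hbase : 0 ≤ (h_ - 1 - (r : Int)) * w := mul_nonneg hh1r (by omega)
    have hposn : 0 ≤ pos := by omega
    have hrow : (h_ - 1 - (r : Int)) * w + w ≤ h_ * w := by
      have h1 : h_ - 1 - (r : Int) + 1 ≤ h_ := by
        have : (r : Int) ≥ 0 := by positivity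
        omega
      calc (h_ - 1 - (r : Int)) * w + w = (h_ - 1 - (r : Int) + 1) * w := by ring
        _ ≤ h_ * w := mul_le_mul_of_nonneg_right h1 (by omega)
    have hposlt : pos < 8 * (bp0.length : Int) := by omega
    have hidx0 : 0 ≤ pos / 8 := by omega
    have hidxlt : pos / 8 < (bp0.length : Int) := by omega
    -- the fetched byte and the mask, uniformly in the two pvBK cases
    obtain ⟨bits1, hfetch, hget1⟩ :
        ∃ bits1, (if b = 0 then (PySem.List.pyGet? bp0 k).map (fun v => (v, k + 1, (128 : Int)))
            else some (bits, k, b)) = some (bits1, pos / 8 + 1, (128 : Int) >>> (pos % 8).toNat) ∧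
          PySem.List.pyGet? bp0 (pos / 8) = some bits1 := by
      rcases hbk with ⟨hm0, hb0, hk⟩ | ⟨hm0, hbm, hk, hget⟩
      · subst hb0; subst hk
        obtain ⟨v, hv⟩ := pv_get_of_range hidx0 hidxlt
        refine ⟨v, ?_, hv⟩
        rw [if_pos rfl, hv]
        simp only [Option.map_some]
        rw [show (128 : Int) >>> ((pos % 8).toNat) = 128 by
          rw [show (pos % 8).toNat = 0 by omega]
          decide]
      · subst hk
        have hbne : b ≠ 0 := by
          obtain ⟨j, hj1, hj2, hpj⟩ : ∃ j : Nat, 1 ≤ j ∧ j < 8 ∧ (pos % 8).toNat = j :=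
            ⟨(pos % 8).toNat, by omega, by omega, rfl⟩
          rw [hbm, hpj]
          interval_cases j <;> decide
        exact ⟨bits, by rw [if_neg hbne, hbm], hget⟩
    obtain ⟨f, rfl⟩ : ∃ f, fuel = f + 1 := ⟨fuel - 1, by omega⟩
    -- the while condition holds
    have hlb : (bp1.length : Int) ≤ (out.length : Int) := by
      rcases hstate with ⟨_, _, _, ho⟩ | ⟨_, ho, _⟩
      · rw [ho]; simp
      · rw [ho]
    have hi8 : i / 8 ≤ (w + 7) / 8 - 1 := by omega
    have hbqn : 0 ≤ (w + 7) >>> (3 : Nat) := by omega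
    have hmul2 : (h_ - 1 - (r : Int)) * ((w + 7) >>> (3 : Nat)) + ((w + 7) >>> (3 : Nat))
        ≤ h_ * ((w + 7) >>> (3 : Nat)) := by
      have h1 : h_ - 1 - (r : Int) + 1 ≤ h_ := by
        have : (r : Int) ≥ 0 := by positivity
        omega
      calc (h_ - 1 - (r : Int)) * ((w + 7) >>> (3 : Nat)) + ((w + 7) >>> (3 : Nat))
          = (h_ - 1 - (r : Int) + 1) * ((w + 7) >>> (3 : Nat)) := by ring
        _ ≤ h_ * ((w + 7) >>> (3 : Nat)) := mul_le_mul_of_nonneg_right h1 hbqn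
    have hcomm : h_ * ((w + 7) >>> (3 : Nat)) = ((w + 7) >>> (3 : Nat)) * h_ := mul_comm _ _
    have hlt : (bp1.length : Int) < ((w + 7) >>> (3 : Nat)) * h_ := by omega
    -- one step of A
    simp only [fontA_loop]
    rw [if_pos hlt]
    simp only [hfetch]
    -- the bit A reads equals the bit the middle form reads
    obtain ⟨j, hjlt, hpj⟩ : ∃ j : Nat, j < 8 ∧ pos % 8 = (j : Int) :=
      ⟨(pos % 8).toNat, by omega, by omega⟩
    have hjN : (pos % 8).toNat = j := by omega
    have hbitA : (if 0 < PySem.Int.band bits1 ((128 : Int) >>> (pos % 8).toNat) then (1 : Int) else 0)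
        = PySem.Int.band (bits1 >>> (7 - j)) 1 := by
      rw [hjN, pv_mask_pow j hjlt, pv_bit]
    have hshift : (7 - PySem.Int.band pos 7).toNat = 7 - j := by
      rw [pv_band7 pos hposn, hpj]; omega
    -- A's mid-row append state equals the middle form's current state
    have hp : (if 0 < i ∧ PySem.Int.band i 7 = 0 then (bp1 ++ [c], (0 : Int)) else (bp1, c))
        = (out, acc) := by
      rcases hstate with ⟨hipos, him, hacc, ho⟩ | ⟨hacc, ho, hcond⟩
      · rw [if_pos (by rw [pv_band7 i hin]; exact ⟨hipos, him⟩), ← ho, hacc]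
      · rw [if_neg (by rw [pv_band7 i hin]; rintro ⟨h1, h2⟩; exact hcond h1 h2), ho, hacc]
    have hbk1 := pv_bk_step bp0 pos bits1 hposn hget1
    -- one step of the middle form
    simp only [fontB_row, pv_shr3, hget1, hshift] at hB
    rcases Nat.eq_zero_or_pos m with hm0 | hmpos
    · -- last bit of the row
      subst hm0
      have hie : i + 1 = w := by omega
      have hw7 : PySem.Int.band (i + 1) 7 = w % 8 := by rw [hie]; exact pv_band7 w (by omega)
      have hS : fontA_step w bp1 i ((128 : Int) >>> (pos % 8).toNat) c bits1 (pos / 8 + 1)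
          = ((out ++ [if w % 8 ≠ 0 then
                (PySem.Int.bor (acc <<< (1 : Nat)) (PySem.Int.band (bits1 >>> (7 - j)) 1))
                  <<< (8 - w % 8).toNat
              else PySem.Int.bor (acc <<< (1 : Nat)) (PySem.Int.band (bits1 >>> (7 - j)) 1)]),
              0, ((128 : Int) >>> (pos % 8).toNat) >>> (1 : Nat), 0, bits1, pos / 8 + 1) := by
        simp only [fontA_step, hp, hbitA, hw7]
        rw [if_pos (by omega)]
      rw [hS]
      have hring : (h_ - 1 - (r : Int)) * w + w = (h_ - (r : Int)) * w := by ring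
      have hringb : (h_ - 1 - (r : Int)) * ((w + 7) >>> (3 : Nat)) + ((w + 7) >>> (3 : Nat))
          = (h_ - (r : Int)) * ((w + 7) >>> (3 : Nat)) := by ring
      have hi81 : i / 8 = (w + 7) / 8 - 1 := by omega
      by_cases hw8 : w % 8 = 0
      · -- the row ends exactly at a byte boundary
        have hcnt8 : cnt + 1 = 8 := by omega
        rw [if_pos hcnt8] at hB
        simp only [fontB_row, Option.some.injEq, Prod.mk.injEq] at hB
        obtain ⟨hout1, hpos1⟩ := hB
        rw [if_neg (by simp)] at hout1
        rw [if_neg (by omega)]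
        refine (Hcont (pos + 1) _ bits1 (pos / 8 + 1) _ f (by omega) ?_ hbk1 (by omega)).trans ?_
        · simp only [List.length_append, List.length_cons, List.length_nil]
          push_cast
          omega
        · rw [hout1, hpos1]
      · -- the row ends with a partial byte, shifted up
        have hcnt8 : ¬ (cnt + 1 = 8) := by omega
        rw [if_neg hcnt8] at hB
        simp only [fontB_row, Option.some.injEq, Prod.mk.injEq] at hB
        obtain ⟨hout1, hpos1⟩ := hB
        rw [if_pos (by omega)] at hout1
        rw [show (8 - (cnt + 1)).toNat = (8 - w % 8).toNat by omega] at hout1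
        rw [if_pos (by omega)]
        refine (Hcont (pos + 1) _ bits1 (pos / 8 + 1) _ f (by omega) ?_ hbk1 (by omega)).trans ?_
        · simp only [List.length_append, List.length_cons, List.length_nil]
          push_cast
          omega
        · rw [hout1, hpos1]
    · -- the row continues
      have hnie : ¬ (w ≤ i + 1) := by omega
      have hS : fontA_step w bp1 i ((128 : Int) >>> (pos % 8).toNat) c bits1 (pos / 8 + 1)
          = (out, i + 1, ((128 : Int) >>> (pos % 8).toNat) >>> (1 : Nat),
              PySem.Int.bor (acc <<< (1 : Nat)) (PySem.Int.band (bits1 >>> (7 - j)) 1),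
              bits1, pos / 8 + 1) := by
        simp only [fontA_step, hp, hbitA]
        rw [if_neg hnie]
      rw [hS]
      by_cases hi7 : i % 8 = 7
      · -- the middle form closes a byte here
        have hcnt8 : cnt + 1 = 8 := by omega
        rw [if_pos hcnt8] at hB
        exact IH (i + 1) (pos + 1) (((128 : Int) >>> (pos % 8).toNat) >>> (1 : Nat)) bits1 (pos / 8 + 1)
          0 0 (PySem.Int.bor (acc <<< (1 : Nat)) (PySem.Int.band (bits1 >>> (7 - j)) 1))
          (out ++ [PySem.Int.bor (acc <<< (1 : Nat)) (PySem.Int.band (bits1 >>> (7 - j)) 1)]) out f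
          hmpos (by omega) (by omega) (by rw [hpos]; push_cast; ring) hbk1 (by omega)
          (Or.inl ⟨by omega, by omega, rfl, rfl⟩)
          (by simp only [List.length_append, List.length_cons, List.length_nil]
              push_cast
              have h1 : (i + 1) / 8 = i / 8 + 1 := by omega
              omega)
          (by omega) out1 pos1 hB
      · -- the middle form keeps accumulating
        have hcnt8 : ¬ (cnt + 1 = 8) := by omega
        rw [if_neg hcnt8] at hB
        exact IH (i + 1) (pos + 1) (((128 : Int) >>> (pos % 8).toNat) >>> (1 : Nat)) bits1 (pos / 8 + 1)
          (PySem.Int.bor (acc <<< (1 : Nat)) (PySem.Int.band (bits1 >>> (7 - j)) 1)) (cnt + 1)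
          (PySem.Int.bor (acc <<< (1 : Nat)) (PySem.Int.band (bits1 >>> (7 - j)) 1))
          out out f
          hmpos (by omega) (by omega) (by rw [hpos]; push_cast; ring) hbk1 (by omega)
          (Or.inr ⟨rfl, rfl, by intro _; omega⟩)
          (by push_cast
              have h1 : (i + 1) / 8 = i / 8 := by omega
              omega)
          (by omega) out1 pos1 hB

lemma pv_outer (w h_ : Int) (bp0 : List Int) (hw : 0 < w) (hh : 0 < h_)
    (hlen : h_ * w ≤ 8 * (bp0.length : Int)) :
    ∀ (r : Nat), (r : Int) ≤ h_ →
      ∀ (pos b bits k : Int) (out : List Int) (fuel : Nat),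
        pos = (h_ - r) * w → (out.length : Int) = (h_ - r) * ((w + 7) >>> (3 : Nat)) →
        pvBK bp0 pos b bits k → r * w.toNat ≤ fuel →
        fontA_loop w (((w + 7) >>> (3 : Nat)) * h_) bp0 fuel out 0 b 0 bits k
          = fontB_rows bp0 w.toNat r pos out := by
  intro r
  induction r with
  | zero =>
    intro _ pos b bits k out fuel hpos hout hbk hfuel
    have hout' : (out.length : Int) = ((w + 7) >>> (3 : Nat)) * h_ := by rw [hout]; push_cast; ring
    cases fuel with
    | zero => simp [fontA_loop, fontB_rows]
    | succ f =>
      simp only [fontA_loop, fontB_rows]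
      rw [if_neg (by omega)]
  | succ r IH =>
    intro hr1 pos b bits k out fuel hpos hout hbk hfuel
    have hwt : ((w.toNat : Int)) = w := Int.toNat_of_nonneg (le_of_lt hw)
    have hrh : (r : Int) < h_ := by push_cast at hr1 ⊢; omega
    have hposnn : 0 ≤ pos := by
      rw [hpos]; exact mul_nonneg (by push_cast; omega) (by omega)
    have hch : (h_ - ((r : Int) + 1)) * w + w = (h_ - r) * w := by ring
    have hle : (h_ - (r : Int)) * w ≤ h_ * w :=
      mul_le_mul_of_nonneg_right (by push_cast; omega) (by omega)
    obtain ⟨out1, hB⟩ := pv_fontB_row_total bp0 w.toNat pos 0 0 out hposnn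
      (by rw [hwt, hpos]; push_cast; push_cast at hch; omega)
    simp only [fontB_rows, hB]
    have hmul : (r + 1) * w.toNat = w.toNat + r * w.toNat := by ring
    exact pv_inner w h_ bp0 hw hh hlen r hrh
      (fun p b' bi k' o f => IH (le_of_lt hrh) p b' bi k' o f)
      w.toNat 0 pos b bits k 0 0 0 out out fuel
      (by omega) (by omega) (by omega)
      (by rw [hpos]; push_cast; ring)
      hbk (by norm_num)
      (Or.inr ⟨rfl, rfl, fun h => absurd h (lt_irrefl 0)⟩)
      (by rw [hout, show (0 : Int) / 8 = 0 from rfl]; push_cast; ring)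
      (by omega)
      out1 (pos + (w.toNat : Int)) hB

-- ===== bridge: the bit-at-a-time middle form equals B's closed-form bytes =====

-- the source byte at index i (defaulting to 0; always in range where it is used)
def pvGetD (bp0 : List Int) (i : Int) : Int := (PySem.List.pyGet? bp0 i).getD 0

-- the source bit at global bit position pos
def pvBit (bp0 : List Int) (pos : Int) : Int :=
  PySem.Int.band ((pvGetD bp0 (pos >>> (3 : Nat))) >>> ((7 - PySem.Int.band pos 7).toNat)) 1

-- the value of the nb source bits starting at pos, MSB first
def pvVal (bp0 : List Int) : Int → Nat → Int
  | _, 0 => 0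
  | pos, nb + 1 => pvBit bp0 pos * 2 ^ nb + pvVal bp0 (pos + 1) nb

-- the two source bytes an output byte is cut from, as one 16-bit word
def pvChunk (bp0 : List Int) (pos : Int) (nb : Nat) : Int :=
  (pvGetD bp0 (pos / 8)) % 256 * 256 +
    (if 8 < (pos % 8).toNat + nb then (pvGetD bp0 (pos / 8 + 1)) % 256 else 0)


lemma pv_shl (a : Int) (k : Nat) : a <<< k = a * 2 ^ k := by rw [Int.shiftLeft_eq]

lemma pv_lor_addN (k X Y : Nat) (h : Y < 2 ^ k) : (X <<< k) ||| Y = X * 2 ^ k + Y := by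
  apply Nat.eq_of_testBit_eq
  intro j
  rw [Nat.testBit_lor, Nat.testBit_shiftLeft,
    show X * 2 ^ k + Y = 2 ^ k * X + Y by ring,
    Nat.testBit_two_pow_mul_add X (by exact h) j]
  by_cases hj : j < k
  · simp [hj, Nat.not_le.mpr hj]
  · have hY : Y.testBit j = false :=
      Nat.testBit_eq_false_of_lt (lt_of_lt_of_le h (Nat.pow_le_pow_right (by norm_num) (by omega)))
    simp [hj, Nat.le_of_not_lt hj, hY]

lemma pv_bor_shift (k : Nat) (X Y : Int) (hX : 0 ≤ X) (hY : 0 ≤ Y) (h : Y < 2 ^ k) :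
    PySem.Int.bor (X <<< k) Y = X * 2 ^ k + Y := by
  have hs : X <<< k = ((X.toNat <<< k : Nat) : Int) := by
    rw [pv_shl]
    push_cast [Nat.shiftLeft_eq]
    rw [Int.toNat_of_nonneg hX]
  have hYk : Y.toNat < 2 ^ k := by
    have h2 : (Y.toNat : Int) < ((2 ^ k : Nat) : Int) := by
      push_cast
      rw [Int.toNat_of_nonneg hY]
      exact h
    exact_mod_cast h2
  rw [hs, show Y = ((Y.toNat : Nat) : Int) by rw [Int.toNat_of_nonneg hY],
    PySem.Int.bor_natCast, pv_lor_addN k X.toNat Y.toNat hYk]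
  push_cast
  rw [Int.toNat_of_nonneg hX, Int.toNat_of_nonneg hY]

lemma pv_band255 (x : Int) : PySem.Int.band x 255 = x % 256 := by
  by_cases hx : 0 ≤ x
  · obtain ⟨m, rfl⟩ := Int.eq_ofNat_of_zero_le hx
    rw [show (255 : Int) = ((255 : Nat) : Int) from rfl, PySem.Int.band_natCast,
      show (255 : Nat) = 2 ^ 8 - 1 from rfl, Nat.and_two_pow_sub_one_eq_mod]
    push_cast
    norm_num
  · obtain ⟨m, hm⟩ : ∃ m : Nat, (m : Int) = -x - 1 := ⟨(-x - 1).toNat, by omega⟩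
    have hband : PySem.Int.band x 255 = ((255 - (255 &&& m) : Nat) : Int) := by
      simp only [PySem.Int.band]
      rw [if_neg (by omega), if_pos (by norm_num)]
      rw [show (-x - 1).toNat = m by omega]
      rfl
    rw [hband, show (255 &&& m) = m &&& (2 ^ 8 - 1) by rw [Nat.and_comm]; rfl,
      Nat.and_two_pow_sub_one_eq_mod]
    have h1 : m % 2 ^ 8 < 256 := Nat.mod_lt _ (by norm_num)
    have h2 : ((m % 2 ^ 8 : Nat) : Int) = (m : Int) % 256 := by push_cast; norm_num
    have h3 : m % 2 ^ 8 ≤ 255 := by omega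
    push_cast [h3, h2]
    omega

lemma pv_band_mask (c : Int) (nb : Nat) (hc : 0 ≤ c) :
    PySem.Int.band c (((1 : Int) <<< nb) - 1) = c % 2 ^ nb := by
  obtain ⟨m, rfl⟩ := Int.eq_ofNat_of_zero_le hc
  have h1 : ((1 : Int) <<< nb) - 1 = ((2 ^ nb - 1 : Nat) : Int) := by
    rw [pv_shl]
    push_cast [Nat.one_le_two_pow]
    ring
  rw [h1, PySem.Int.band_natCast, Nat.and_two_pow_sub_one_eq_mod]
  push_cast
  ring

lemma pv_mod_split (a P : Int) (hP : 0 < P) :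
    a % (P * 2) = a % P + P * (a / P % 2) := by
  have hq := Int.ediv_add_emod a P
  have hq2 := Int.ediv_add_emod (a / P) 2
  have h1 : a = (P * (a / P % 2) + a % P) + (P * 2) * (a / P / 2) := by
    linear_combination hq.symm + P * hq2.symm
  have hr0 : 0 ≤ a % P := Int.emod_nonneg a (by omega)
  have hrP : a % P < P := Int.emod_lt_of_pos a hP
  have ht0 : 0 ≤ a / P % 2 := Int.emod_nonneg _ (by omega)
  have ht1 : a / P % 2 < 2 := Int.emod_lt_of_pos _ (by omega)
  have hb0 : 0 ≤ P * (a / P % 2) + a % P := by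
    have := mul_nonneg (le_of_lt hP) ht0
    omega
  have hb1 : P * (a / P % 2) + a % P < P * 2 := by
    have h2 : P * (a / P % 2) ≤ P * 1 := mul_le_mul_of_nonneg_left (by omega) (le_of_lt hP)
    omega
  conv_lhs => rw [h1]
  rw [Int.add_mul_emod_self_left, Int.emod_eq_of_lt hb0 hb1]
  ring

-- the bit stream read MSB-first equals the field cut out of the chunk
lemma pv_val_chunk (bp0 : List Int) :
    ∀ nb : Nat, ∀ pos : Int, nb ≤ 8 → 0 ≤ pos →
      pvVal bp0 pos nb = pvChunk bp0 pos nb / 2 ^ (16 - (pos % 8).toNat - nb) % 2 ^ nb := by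
  intro nb
  induction nb with
  | zero => intro pos _ _; simp [pvVal, Int.emod_one]
  | succ nb IH =>
    intro pos h8 hpos
    have hnb8 : nb ≤ 8 := by omega
    have hm0 : 0 ≤ pos % 8 := Int.emod_nonneg pos (by norm_num)
    have hm8 : pos % 8 < 8 := Int.emod_lt_of_pos pos (by norm_num)
    obtain ⟨o, ho, ho7⟩ : ∃ o : Nat, (pos % 8).toNat = o ∧ o ≤ 7 := ⟨(pos % 8).toNat, rfl, by omega⟩
    set x := pvGetD bp0 (pos / 8) with hxdef
    have hbit : pvBit bp0 pos = x / 2 ^ (7 - o) % 2 := by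
      unfold pvBit
      rw [pv_shr3, pv_band7 pos hpos, show (7 - pos % 8).toNat = 7 - o by omega,
        PySem.Int.band_one, PySem.Int.mod_eq_emod_of_pos (by norm_num),
        Int.shiftRight_eq_div_pow, ← hxdef]
      push_cast
      ring
    set X := x % 256 with hXdef
    have hX0 : 0 ≤ X := Int.emod_nonneg x (by norm_num)
    have hX256 : X < 256 := Int.emod_lt_of_pos x (by norm_num)
    show pvBit bp0 pos * 2 ^ nb + pvVal bp0 (pos + 1) nb = _
    by_cases ho7' : o = 7
    · -- the next bit starts a new source byte
      subst ho7'
      have e1 : ((pos + 1) % 8).toNat = 0 := by omega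
      have e2 : (pos + 1) / 8 = pos / 8 + 1 := by omega
      set y := pvGetD bp0 (pos / 8 + 1) with hydef
      set Y := y % 256 with hYdef
      have hY0 : 0 ≤ Y := Int.emod_nonneg y (by norm_num)
      have hY256 : Y < 256 := Int.emod_lt_of_pos y (by norm_num)
      rcases Nat.eq_zero_or_pos nb with hnb0 | hnbpos
      · subst hnb0
        have hcl : pvChunk bp0 pos 1 = X * 256 := by
          unfold pvChunk
          rw [ho, if_neg (by omega), ← hxdef, ← hXdef]
          ring
        rw [hcl, hbit, ho]
        simp only [pvVal]
        norm_num
        omega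
      · -- nb ≥ 1: the chunk spans two source bytes
        have hcl : pvChunk bp0 pos (nb + 1) = X * 256 + Y := by
          unfold pvChunk
          rw [ho, if_pos (by omega), ← hxdef, ← hXdef, ← hydef, ← hYdef]
        have hcl' : pvChunk bp0 (pos + 1) nb = Y * 256 := by
          unfold pvChunk
          rw [e1, e2, if_neg (by omega), ← hydef, ← hYdef]
          ring
        rw [hcl, IH (pos + 1) hnb8 (by omega), hcl', e1, ho]
        set d := Y / 2 ^ (8 - nb) with hddef
        have hYq : Y * 256 / 2 ^ (16 - 0 - nb) = d := by
          rw [show (16 - 0 - nb) = (8 - nb) + 8 by omega, pow_add,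
            show ((2 : Int) ^ 8) = 256 by norm_num, hddef,
            show Y * 256 = 256 * Y by ring, show (2 : Int) ^ (8 - nb) * 256 = 256 * 2 ^ (8 - nb) by ring,
            Int.mul_ediv_mul_of_pos Y (2 ^ (8 - nb) : Int) (by norm_num : (0:Int) < 256)]
        have hsplit : (X * 256 + Y) / 2 ^ (16 - 7 - (nb + 1)) = X * 2 ^ nb + d := by
          rw [show (16 - 7 - (nb + 1)) = 8 - nb by omega,
            show X * 256 + Y = Y + (X * 2 ^ nb) * 2 ^ (8 - nb) by
              rw [mul_assoc, ← pow_add, show nb + (8 - nb) = 8 by omega]; ring,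
            Int.add_mul_ediv_right _ _ (by positivity : ((2:Int) ^ (8 - nb)) ≠ 0), hddef]
          ring
        have hdlt : d < 2 ^ nb := by
          rw [hddef]
          apply Int.ediv_lt_of_lt_mul (by positivity)
          calc Y < 256 := hY256
            _ = 2 ^ nb * 2 ^ (8 - nb) := by rw [← pow_add, show nb + (8 - nb) = 8 by omega]; norm_num
        have hd0 : 0 ≤ d := Int.ediv_nonneg hY0 (by positivity)
        have hm1 : (X * 2 ^ nb + d) % 2 ^ nb = d := by
          rw [show X * 2 ^ nb + d = d + 2 ^ nb * X by ring, Int.add_mul_emod_self_left,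
            Int.emod_eq_of_lt hd0 hdlt]
        have hm2 : (X * 2 ^ nb + d) / 2 ^ nb = X := by
          rw [show X * 2 ^ nb + d = d + X * 2 ^ nb by ring,
            Int.add_mul_ediv_right _ _ (by positivity : ((2:Int) ^ nb) ≠ 0),
            Int.ediv_eq_zero_of_lt hd0 hdlt]
          ring
        rw [hYq, hsplit, pow_succ, pv_mod_split _ (2 ^ nb) (by positivity), hm1, hm2,
          Int.emod_eq_of_lt hd0 hdlt, hbit]
        have hx2 : x / 2 ^ (7 - 7) % 2 = X % 2 := by norm_num; omega
        rw [hx2]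
        ring
    · -- the next bit stays in the same source byte
      have e1 : ((pos + 1) % 8).toNat = o + 1 := by omega
      have e2 : (pos + 1) / 8 = pos / 8 := by omega
      have echunk : pvChunk bp0 (pos + 1) nb = pvChunk bp0 pos (nb + 1) := by
        unfold pvChunk
        rw [e1, e2, ho, show o + 1 + nb = o + (nb + 1) by omega]
      rw [IH (pos + 1) hnb8 (by omega), echunk, e1, ho]
      set c := pvChunk bp0 pos (nb + 1) with hcdef
      obtain ⟨B, hc, hB0, hB256⟩ : ∃ B, c = X * 256 + B ∧ 0 ≤ B ∧ B < 256 := by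
        rw [hcdef]
        unfold pvChunk
        rw [ho, ← hxdef, ← hXdef]
        split_ifs with hif
        · exact ⟨pvGetD bp0 (pos / 8 + 1) % 256, rfl,
            Int.emod_nonneg _ (by norm_num), Int.emod_lt_of_pos _ (by norm_num)⟩
        · exact ⟨0, rfl, le_refl 0, by norm_num⟩
      have hc0 : 0 ≤ c := by omega
      have eK : 16 - (o + 1) - nb = 16 - o - (nb + 1) := by omega
      rw [eK]
      set K := 16 - o - (nb + 1) with hKdef
      have hdd : c / 2 ^ K / 2 ^ nb = c / 2 ^ (15 - o) := by
        rw [Int.ediv_ediv_eq_ediv_mul (by positivity), ← pow_add,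
          show K + nb = 15 - o by omega]
      rw [pow_succ, pv_mod_split (c / 2 ^ K) (2 ^ nb) (by positivity), hdd, hbit]
      have hkey : x / 2 ^ (7 - o) % 2 = c / 2 ^ (15 - o) % 2 := by
        rw [hc]
        have hXx : X = x % 256 := hXdef
        interval_cases o <;> (norm_num; omega)
      rw [hkey]
      ring

lemma pv_getD_eq {bp0 : List Int} {i : Int} {v : Int} (h : PySem.List.pyGet? bp0 i = some v) :
    pvGetD bp0 i = v := by
  unfold pvGetD
  rw [h]
  rfl

lemma pv_bit_bounds (a : Int) : 0 ≤ PySem.Int.band a 1 ∧ PySem.Int.band a 1 < 2 := by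
  rw [PySem.Int.band_one, PySem.Int.mod_eq_emod_of_pos (by norm_num)]
  exact ⟨Int.emod_nonneg a (by norm_num), Int.emod_lt_of_pos a (by norm_num)⟩

-- the bit the middle form reads is pvBit
lemma pv_bit_eq {bp0 : List Int} {pos : Int} {x : Int}
    (hx : PySem.List.pyGet? bp0 (pos >>> (3 : Nat)) = some x) :
    PySem.Int.band (x >>> (7 - PySem.Int.band pos 7).toNat) 1 = pvBit bp0 pos := by
  unfold pvBit
  rw [pv_getD_eq hx]

lemma pv_byte (bp0 : List Int) (s : Int) (nb : Nat) (h1 : 1 ≤ nb) (h8 : nb ≤ 8)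
    (hs : 0 ≤ s) (hr : s + nb ≤ 8 * (bp0.length : Int)) :
    fontC_byte bp0 s (s + nb) = some (pvVal bp0 s nb * 2 ^ (8 - nb)) := by
  have hlen : 0 < (bp0.length : Int) := by omega
  obtain ⟨x, hx⟩ := pv_get_of_range (show 0 ≤ s / 8 by omega) (show s / 8 < (bp0.length : Int) by omega)
  have hx' : PySem.List.pyGet? bp0 (s >>> (3 : Nat)) = some x := by rw [pv_shr3]; exact hx
  obtain ⟨o, ho, ho0, ho7⟩ : ∃ o : Nat, (s % 8).toNat = o ∧ 0 ≤ o ∧ o ≤ 7 :=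
    ⟨(s % 8).toNat, rfl, by omega, by omega⟩
  have hoff : PySem.Int.band s 7 = s % 8 := pv_band7 s hs
  have hnbi : s + nb - s = (nb : Int) := by ring
  have hKnat : (16 - (s % 8) - (nb : Int)).toNat = 16 - o - nb := by omega
  have h8nb : ((8 : Int) - (nb : Int)).toNat = 8 - nb := by omega
  have hnbnat : ((nb : Int)).toNat = nb := by omega
  have hvc := pv_val_chunk bp0 nb s h8 hs
  rw [ho] at hvc
  simp only [fontC_byte, pv_shr3, hx, hnbi, hoff, hKnat, h8nb, hnbnat]
  by_cases hsplit : s / 8 < (s + (nb : Int) - 1) / 8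
  · -- the output byte spans two source bytes
    have hcond : 8 < o + nb := by omega
    obtain ⟨y, hy⟩ := pv_get_of_range (show 0 ≤ s / 8 + 1 by omega)
      (show s / 8 + 1 < (bp0.length : Int) by omega)
    rw [if_pos hsplit]
    simp only [hy]
    have hch : PySem.Int.bor ((PySem.Int.band x 255) <<< (8 : Nat)) (PySem.Int.band y 255)
        = pvChunk bp0 s nb := by
      rw [pv_band255, pv_band255,
        pv_bor_shift 8 (x % 256) (y % 256) (Int.emod_nonneg x (by norm_num))
          (Int.emod_nonneg y (by norm_num)) (by norm_num [show ((2:Int)^8) = 256 from rfl]; exact Int.emod_lt_of_pos y (by norm_num))]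
      unfold pvChunk
      rw [ho, if_pos hcond, pv_getD_eq hx, pv_getD_eq hy]
      norm_num
    rw [hch, Int.shiftRight_eq_div_pow, pv_band_mask _ _ ?hpos, pv_shl, hvc]
    case _ => norm_cast
    case hpos =>
      apply Int.ediv_nonneg _ (by positivity)
      unfold pvChunk
      have h1' : 0 ≤ pvGetD bp0 (s / 8) % 256 := Int.emod_nonneg _ (by norm_num)
      have h2' : 0 ≤ pvGetD bp0 (s / 8 + 1) % 256 := Int.emod_nonneg _ (by norm_num)
      split_ifs <;> nlinarith
  · -- the output byte lies inside one source byte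
    have hcond : ¬ (8 < o + nb) := by omega
    rw [if_neg hsplit]
    have hch : (PySem.Int.band x 255) <<< (8 : Nat) = pvChunk bp0 s nb := by
      rw [pv_band255, pv_shl]
      unfold pvChunk
      rw [ho, if_neg hcond, pv_getD_eq hx]
      norm_num
    rw [hch, Int.shiftRight_eq_div_pow, pv_band_mask _ _ ?hpos, pv_shl, hvc]
    case _ => norm_cast
    case hpos =>
      apply Int.ediv_nonneg _ (by positivity)
      unfold pvChunk
      have h1' : 0 ≤ pvGetD bp0 (s / 8) % 256 := Int.emod_nonneg _ (by norm_num)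
      have h2' : 0 ≤ pvGetD bp0 (s / 8 + 1) % 256 := Int.emod_nonneg _ (by norm_num)
      split_ifs <;> nlinarith

lemma pv_F1 (bp0 : List Int) :
    ∀ nb : Nat, 1 ≤ nb → ∀ (m : Nat) (cnt acc pos : Int) (out : List Int),
      cnt = 8 - (nb : Int) → 0 ≤ acc → nb ≤ m → 0 ≤ pos → pos + nb ≤ 8 * (bp0.length : Int) →
      fontB_row bp0 m pos acc cnt out
        = fontB_row bp0 (m - nb) (pos + nb) 0 0 (out ++ [acc * 2 ^ nb + pvVal bp0 pos nb]) := by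
  intro nb
  induction nb with
  | zero => intro h; omega
  | succ nb IH =>
    intro _ m cnt acc pos out hcnt hacc hm hpos hr
    obtain ⟨m', rfl⟩ : ∃ m', m = m' + 1 := ⟨m - 1, by omega⟩
    obtain ⟨x, hx⟩ := pv_get_of_range (show 0 ≤ pos / 8 by omega)
      (show pos / 8 < (bp0.length : Int) by push_cast at hr ⊢; omega)
    have hx' : PySem.List.pyGet? bp0 (pos >>> (3 : Nat)) = some x := by rw [pv_shr3]; exact hx
    have hbb := pv_bit_bounds (x >>> (7 - PySem.Int.band pos 7).toNat)
    have hacc1 : PySem.Int.bor (acc <<< (1 : Nat))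
        (PySem.Int.band (x >>> (7 - PySem.Int.band pos 7).toNat) 1)
        = 2 * acc + pvBit bp0 pos := by
      rw [pv_bor_shift 1 acc _ hacc hbb.1 (by exact_mod_cast hbb.2), pv_bit_eq hx']
      ring
    rcases Nat.eq_zero_or_pos nb with hnb0 | hnbpos
    · subst hnb0
      have hc7 : cnt = 7 := by omega
      simp only [fontB_row, pv_shr3, hx, hc7]
      rw [if_pos (by norm_num), hacc1]
      have e1 : m' + 1 - 1 = m' := by omega
      have e2 : pos + ((1 : Nat) : Int) = pos + 1 := by norm_num
      rw [e1, e2]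
      congr 2
      simp only [pvVal]
      ring
    · simp only [fontB_row, pv_shr3, hx]
      rw [if_neg (by omega), hacc1]
      have hIH := IH hnbpos m' (cnt + 1) (2 * acc + pvBit bp0 pos) (pos + 1) out
        (by push_cast at hcnt ⊢; omega)
        (by have := (pv_bit_bounds ((pvGetD bp0 (pos >>> (3:Nat))) >>> (7 - PySem.Int.band pos 7).toNat)).1
            unfold pvBit
            omega)
        (by omega) (by omega) (by push_cast at hr ⊢; omega)
      rw [hIH]
      have e1 : m' - nb = m' + 1 - (nb + 1) := by omega
      have e2 : pos + 1 + (nb : Int) = pos + ((nb + 1 : Nat) : Int) := by push_cast; ring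
      rw [e1, e2]
      congr 3
      simp only [pvVal]
      ring

lemma pv_F2 (bp0 : List Int) :
    ∀ nb : Nat, ∀ (cnt acc pos : Int) (out : List Int),
      0 ≤ cnt → cnt + (nb : Int) < 8 → 0 ≤ acc → 0 ≤ pos → pos + nb ≤ 8 * (bp0.length : Int) →
      fontB_row bp0 nb pos acc cnt out
        = some ((if cnt + (nb : Int) ≠ 0
            then out ++ [(acc * 2 ^ nb + pvVal bp0 pos nb) * 2 ^ (8 - (cnt + nb)).toNat]
            else out), pos + nb) := by
  intro nb
  induction nb with
  | zero =>
    intro cnt acc pos out hc0 hc8 hacc hpos hr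
    simp only [fontB_row, Nat.cast_zero, add_zero, pow_zero, pvVal]
    by_cases hcz : cnt = 0
    · rw [if_neg (by omega), if_neg (by omega)]
    · rw [if_pos (by omega), if_pos (by omega), pv_shl]
      norm_num
  | succ nb IH =>
    intro cnt acc pos out hc0 hc8 hacc hpos hr
    obtain ⟨x, hx⟩ := pv_get_of_range (show 0 ≤ pos / 8 by omega)
      (show pos / 8 < (bp0.length : Int) by push_cast at hr ⊢; omega)
    have hx' : PySem.List.pyGet? bp0 (pos >>> (3 : Nat)) = some x := by rw [pv_shr3]; exact hx
    have hbb := pv_bit_bounds (x >>> (7 - PySem.Int.band pos 7).toNat)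
    have hacc1 : PySem.Int.bor (acc <<< (1 : Nat))
        (PySem.Int.band (x >>> (7 - PySem.Int.band pos 7).toNat) 1)
        = 2 * acc + pvBit bp0 pos := by
      rw [pv_bor_shift 1 acc _ hacc hbb.1 (by exact_mod_cast hbb.2), pv_bit_eq hx']
      ring
    simp only [fontB_row, pv_shr3, hx]
    rw [if_neg (by push_cast at hc8 ⊢; omega), hacc1]
    have hbit0 : 0 ≤ pvBit bp0 pos := by
      have := (pv_bit_bounds ((pvGetD bp0 (pos >>> (3:Nat))) >>> (7 - PySem.Int.band pos 7).toNat)).1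
      unfold pvBit
      omega
    rw [IH (cnt + 1) (2 * acc + pvBit bp0 pos) (pos + 1) out (by omega)
      (by push_cast at hc8 ⊢; omega) (by omega) (by omega) (by push_cast at hr ⊢; omega)]
    rw [if_pos (by omega), if_pos (by push_cast; omega)]
    have e2 : pos + 1 + (nb : Int) = pos + ((nb + 1 : Nat) : Int) := by push_cast; ring
    have e3 : (8 - (cnt + 1 + (nb : Int))).toNat = (8 - (cnt + ((nb + 1 : Nat) : Int))).toNat := by
      push_cast
      omega
    rw [e2, e3]
    congr 3
    simp only [pvVal]
    ring

lemma pv_cols (bp0 : List Int) (w base : Int) (hw : 0 < w) (hbase : 0 ≤ base)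
    (hrange : base + w ≤ 8 * (bp0.length : Int)) :
    ∀ bc : Nat, ∀ (jb : Int) (out : List Int), 0 ≤ jb → 8 * jb ≤ w →
      (bc : Int) = (w - 8 * jb + 7) / 8 →
      fontB_row bp0 (w - 8 * jb).toNat (base + 8 * jb) 0 0 out
        = (fontC_cols bp0 base w bc jb out).map (fun o => (o, base + w)) := by
  intro bc
  induction bc with
  | zero =>
    intro jb out hjb hjw hbc
    have hmm : w - 8 * jb = 0 := by omega
    rw [hmm]
    simp only [Int.toNat_zero, fontB_row, fontC_cols, Option.map_some]
    rw [if_neg (by norm_num), show base + 8 * jb = base + w by omega]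
  | succ bc IH =>
    intro jb out hjb hjw hbc
    have hmm1 : 1 ≤ w - 8 * jb := by omega
    by_cases h8 : 8 ≤ w - 8 * jb
    · -- a full output byte
      have hF1 := pv_F1 bp0 8 (by norm_num) (w - 8 * jb).toNat 0 0 (base + 8 * jb) out
        (by norm_num) (le_refl 0) (by omega) (by omega) (by push_cast; omega)
      rw [show ((8 : Nat) : Int) = 8 by norm_num] at hF1
      rw [hF1]
      have hCB := pv_byte bp0 (base + 8 * jb) 8 (by norm_num) (le_refl 8)
        (by omega) (by push_cast; omega)
      simp only [fontC_cols]
      rw [min_eq_left (by omega), show base + 8 * jb + 8 = base + 8 * jb + ((8 : Nat) : Int) by norm_num,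
        hCB]
      have hIH := IH (jb + 1) (out ++ [pvVal bp0 (base + 8 * jb) 8 * 2 ^ (8 - 8)]) (by omega)
        (by omega) (by omega)
      rw [show w - 8 * (jb + 1) = w - 8 * jb - 8 by ring, show base + 8 * (jb + 1) = base + 8 * jb + 8 by ring] at hIH
      rw [show (w - 8 * jb).toNat - 8 = (w - 8 * jb - 8).toNat by omega,
        show base + 8 * jb + ((8 : Nat) : Int) = base + 8 * jb + 8 by push_cast; ring]
      rw [show (0 : Int) * 2 ^ (8 : Nat) + pvVal bp0 (base + 8 * jb) 8 = pvVal bp0 (base + 8 * jb) 8 * 2 ^ (8 - 8) by norm_num]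
      exact hIH
    · -- the final partial byte of the row
      have hbc0 : bc = 0 := by omega
      subst hbc0
      have hnb : 1 ≤ (w - 8 * jb).toNat ∧ (w - 8 * jb).toNat ≤ 7 := by omega
      have hF2 := pv_F2 bp0 (w - 8 * jb).toNat 0 0 (base + 8 * jb) out (le_refl 0)
        (by push_cast; omega) (le_refl 0) (by omega) (by push_cast; omega)
      rw [hF2]
      have hCB := pv_byte bp0 (base + 8 * jb) (w - 8 * jb).toNat (by omega) (by omega)
        (by omega) (by push_cast; omega)
      have hval : ((0 : Int) * 2 ^ (w - 8 * jb).toNat + pvVal bp0 (base + 8 * jb) (w - 8 * jb).toNat)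
          * 2 ^ ((8 - (0 + ((w - 8 * jb).toNat : Int))).toNat)
          = pvVal bp0 (base + 8 * jb) (w - 8 * jb).toNat * 2 ^ (8 - (w - 8 * jb).toNat) := by
        rw [show ((8 : Int) - (0 + ((w - 8 * jb).toNat : Int))).toNat = 8 - (w - 8 * jb).toNat by omega]
        ring
      rw [if_pos (by push_cast; omega), hval,
        show base + 8 * jb + (((w - 8 * jb).toNat : Nat) : Int) = base + w by push_cast; omega]
      simp only [fontC_cols]
      rw [min_eq_right (by omega),
        show base + w = base + 8 * jb + ((w - 8 * jb).toNat : Int) by push_cast; omega, hCB]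
      simp only [Option.map_some]

lemma pv_rows (bp0 : List Int) (w : Int) (hw : 0 < w) (bpr : Nat)
    (hbpr : (bpr : Int) = (w + 7) / 8) :
    ∀ k : Nat, ∀ (r : Int) (out : List Int), 0 ≤ r →
      (r + k) * w ≤ 8 * (bp0.length : Int) →
      fontB_rows bp0 w.toNat k (r * w) out = fontC_rows bp0 w bpr k r out := by
  intro k
  induction k with
  | zero => intro r out _ _; rfl
  | succ k IH =>
    intro r out hr hk
    have hrow : (r + 1) * w ≤ 8 * (bp0.length : Int) := by
      calc (r + 1) * w ≤ (r + (k + 1 : Nat)) * w := by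
            apply mul_le_mul_of_nonneg_right _ (by omega)
            push_cast
            omega
        _ ≤ 8 * (bp0.length : Int) := hk
    have hcols := pv_cols bp0 w (r * w) hw (mul_nonneg hr (by omega))
      (by calc r * w + w = (r + 1) * w := by ring
            _ ≤ 8 * (bp0.length : Int) := hrow)
      bpr 0 out (le_refl 0) (by omega) (by omega)
    rw [show w - 8 * 0 = w by ring, show r * w + 8 * 0 = r * w by ring] at hcols
    simp only [fontB_rows, fontC_rows, hcols]
    cases hcc : fontC_cols bp0 (r * w) w bpr 0 out with
    | none => rfl
    | some out1 =>
      simp only [Option.map_some]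
      rw [show r * w + w = (r + 1) * w by ring]
      refine IH (r + 1) out1 (by omega) ?_
      push_cast at hk
      rw [show (r + 1 + (k : Int)) * w = (r + ((k : Int) + 1)) * w by ring]
      exact hk

-- ===== VERDICT (by name: the statement is the Claim_ definition above) =====
theorem font0_font1_spec : Claim_unchanged_font0_font1 := by
  intro w h_ bp0 _ hpre hD
  by_cases hp : 0 < w ∧ 0 < h_
  · obtain ⟨hw, hh⟩ := hp
    have hwt : ((w.toNat : Int)) = w := Int.toNat_of_nonneg (le_of_lt hw)
    have hht : ((h_.toNat : Int)) = h_ := Int.toNat_of_nonneg (le_of_lt hh)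
    have hlen : h_ * w ≤ 8 * (bp0.length : Int) := by
      have h1 := hpre.1 hw hh
      calc h_ * w = w * h_ := mul_comm _ _
        _ ≤ 8 * (bp0.length : Int) := h1
    have halt : font0_font1_alt w h_ bp0
        = fontC_rows bp0 w (((w + 7) >>> (3 : Nat)).toNat) h_.toNat 0 [] := by
      rw [font0_font1_alt, if_neg (by omega)]
    rw [halt]
    show fontA_loop w (((w + 7) >>> (3 : Nat)) * h_) bp0 (8 * (((w + 7) >>> (3 : Nat)) * h_)).toNat [] 0 0 0 0 0
      = fontC_rows bp0 w (((w + 7) >>> (3 : Nat)).toNat) h_.toNat 0 []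
    have hbq : (w + 7) >>> (3 : Nat) = (w + 7) / 8 := pv_bq w
    have hw8 : w ≤ 8 * ((w + 7) >>> (3 : Nat)) := by rw [hbq]; omega
    have hfuelI : h_ * w ≤ 8 * (((w + 7) >>> (3 : Nat)) * h_) := by
      calc h_ * w = w * h_ := mul_comm _ _
        _ ≤ (8 * ((w + 7) >>> (3 : Nat))) * h_ := mul_le_mul_of_nonneg_right hw8 (by omega)
        _ = 8 * (((w + 7) >>> (3 : Nat)) * h_) := by ring
    have hfuel : h_.toNat * w.toNat ≤ (8 * (((w + 7) >>> (3 : Nat)) * h_)).toNat := by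
      have e1 : (((h_.toNat * w.toNat : Nat)) : Int) = h_ * w := by push_cast; rw [hwt, hht]
      omega
    have hmid := pv_outer w h_ bp0 hw hh hlen h_.toNat (by omega) 0 0 0 0 [] _
      (by rw [hht]; ring) (by rw [hht]; simp)
      (Or.inl ⟨by norm_num, rfl, by norm_num⟩) hfuel
    rw [hmid]
    have hC := pv_rows bp0 w hw (((w + 7) >>> (3 : Nat)).toNat)
      (by rw [Int.toNat_of_nonneg (by omega), hbq]) h_.toNat 0 [] (by omega)
      (by rw [show ((0 : Int) + h_.toNat) * w = h_ * w by rw [hht]; ring]; exact hlen)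
    rw [show (0 : Int) * w = 0 by ring] at hC
    exact hC
  · have hwh : w ≤ 0 ∨ h_ ≤ 0 := by omega
    have hD' : ¬(w ≤ -8 ∧ h_ ≤ -1) := hD
    have hbq : (w + 7) >>> (3 : Nat) = (w + 7) / 8 := pv_bq w
    have hn : ((w + 7) >>> (3 : Nat)) * h_ ≤ 0 := by
      by_cases hw0 : 0 < w
      · have hh0 : h_ ≤ 0 := by omega
        have hbq0 : 0 ≤ (w + 7) >>> (3 : Nat) := by rw [hbq]; omega
        nlinarith
      · by_cases hh0 : 0 ≤ h_
        · have hbq0 : (w + 7) >>> (3 : Nat) ≤ 0 := by rw [hbq]; omega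
          nlinarith
        · have hw7 : -7 ≤ w := by omega
          have hbq0 : (w + 7) >>> (3 : Nat) = 0 := by rw [hbq]; omega
          rw [hbq0]; simp
    have hA : font0_font1 w h_ bp0 = [] := by
      show fontA_loop w (((w + 7) >>> (3 : Nat)) * h_) bp0 (8 * (((w + 7) >>> (3 : Nat)) * h_)).toNat [] 0 0 0 0 0 = []
      rw [show (8 * (((w + 7) >>> (3 : Nat)) * h_)).toNat = 0 by omega]
      rfl
    rw [hA, font0_font1_alt, if_pos hwh]

theorem font0_font1_changed : Claim_changed_font0_font1 := by
  unfold Claim_changed_font0_font1; decide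

theorem font0_font1_tight : Claim_exact_font0_font1 := by
  intro w h_ bp0 _ hpre hD
  obtain ⟨hw8, hh1⟩ := hD
  have hbq : (w + 7) >>> (3 : Nat) = (w + 7) / 8 := pv_bq w
  have hb : ((w + 7) >>> (3 : Nat)) ≤ -1 := by rw [hbq]; omega
  have hn1 : 1 ≤ ((w + 7) >>> (3 : Nat)) * h_ := by
    have hA : (1 : Int) ≤ -((w + 7) >>> (3 : Nat)) := by omega
    have hB : (1 : Int) ≤ -h_ := by omega
    calc (1 : Int) = 1 * 1 := by ring
      _ ≤ (-((w + 7) >>> (3 : Nat))) * (-h_) := mul_le_mul hA hB (by omega) (by omega)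
      _ = ((w + 7) >>> (3 : Nat)) * h_ := by ring
  have hlen1 : 1 ≤ (bp0.length : Int) := by have := hpre.2 hw8 hh1; omega
  cases bp0 with
  | nil => simp at hlen1
  | cons v t =>
    have hBe : font0_font1_alt w h_ (v :: t) = [] := by
      rw [font0_font1_alt, if_pos (by omega)]
    rw [hBe]
    obtain ⟨f, hf⟩ : ∃ f, (8 * (((w + 7) >>> (3 : Nat)) * h_)).toNat = f + 1 :=
      ⟨(8 * (((w + 7) >>> (3 : Nat)) * h_)).toNat - 1, by omega⟩
    have hget : PySem.List.pyGet? (v :: t) 0 = some v := by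
      simpa using PySem.List.pyGet?_natCast (v :: t) 0
    have h1 : font0_font1 w h_ (v :: t)
        = fontA_loop w (((w + 7) >>> (3 : Nat)) * h_) (v :: t) (f + 1) [] 0 0 0 0 0 := by
      show fontA_loop w (((w + 7) >>> (3 : Nat)) * h_) (v :: t)
        (8 * (((w + 7) >>> (3 : Nat)) * h_)).toNat [] 0 0 0 0 0 = _
      rw [hf]
    have h2 : fontA_loop w (((w + 7) >>> (3 : Nat)) * h_) (v :: t) (f + 1) [] 0 0 0 0 0
        = fontA_loop w (((w + 7) >>> (3 : Nat)) * h_) (v :: t) f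
            (fontA_step w [] 0 128 0 v 1).1 (fontA_step w [] 0 128 0 v 1).2.1
            (fontA_step w [] 0 128 0 v 1).2.2.1 (fontA_step w [] 0 128 0 v 1).2.2.2.1
            (fontA_step w [] 0 128 0 v 1).2.2.2.2.1 (fontA_step w [] 0 128 0 v 1).2.2.2.2.2 := by
      simp only [fontA_loop]
      rw [if_pos (by simpa using hn1)]
      simp [hget]
    have hsl : 1 ≤ (fontA_step w [] 0 128 0 v 1).1.length := by
      simp only [fontA_step]
      split_ifs <;> simp_all <;> omega
    have hmono := fontA_loop_len_mono w (((w + 7) >>> (3 : Nat)) * h_) (v :: t) f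
      (fontA_step w [] 0 128 0 v 1).1 (fontA_step w [] 0 128 0 v 1).2.1
      (fontA_step w [] 0 128 0 v 1).2.2.1 (fontA_step w [] 0 128 0 v 1).2.2.2.1
      (fontA_step w [] 0 128 0 v 1).2.2.2.2.1 (fontA_step w [] 0 128 0 v 1).2.2.2.2.2
    intro hEq
    rw [h1, h2] at hEq
    rw [hEq] at hmono
    simp only [List.length_nil] at hmono
    omega
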